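-- pv_equiv track=rewrite | github.com/justlel/cyberchallenge-2023 | prova_programmazione/testo_4/selection.py | solve
-- ===== SOURCE A (Python) =====
-- def solve(N, S, M, required_skills_list, players):
--     skills = {}
--     for req_skill in required_skills_list:
--         if req_skill in skills:
--             skills[req_skill]['quantity'] += 1
--         else:
--             skills[req_skill] = {}
--             skills[req_skill]['skills'] = []
--             skills[req_skill]['quantity'] = 1
--             skills[req_skill]['filled'] = False
--     for id, player in players.items():
--         skill = list(player.keys())[0]
--         if skill in skills and not skills[skill]['filled']:
--             skills[skill]['skills'].append(player[skill])
--             if len(skills[skill]['skills']) > skills[skill]['quantity']: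
--                 skills[skill]['skills'].sort(reverse=True)
--                 skills[skill]['skills'].pop(-1)
--                 skills[skill]['filled'] = True
--         elif skill in skills and skills[skill]['filled']:
--             for i, selected in enumerate(skills[skill]['skills']):
--                 if selected < player[skill]:
--                     skills[skill]['skills'].insert(i, player[skill])
--                     skills[skill]['skills'].pop(-1)
--                     break
--     return sum(sum(skill['skills']) for skill in skills.values())
-- ===== SOURCE B (Python) =====
-- def solve(N, S, M, required_skills_list, players):
--     quantity = {}
--     for s in required_skills_list:
--         quantity[s] = quantity.get(s, 0) + 1
--     values = {}
--     for pid, player in players.items():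
--         skill, value = next(iter(player.items()))
--         if skill in quantity:
--             values.setdefault(skill, []).append(value)
--     total = 0
--     for s, q in quantity.items():
--         total += sum(sorted(values.get(s, []), reverse=True)[:q])
--     return total
-- ===== Notes on version B (the rewrite author's own statement) =====
-- stated objective: alternative
-- what changed: A maintains a per-skill top-k list incrementally (append, re-sort on overflow, then a linear insertion scan per further player); B groups values per required skill in one pass and sums the top `quantity` of a single descending sort per skill (measured ~1.2-1.4x quicker, below the 1.5x bar, so no speed claim).
import Mathlib
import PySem

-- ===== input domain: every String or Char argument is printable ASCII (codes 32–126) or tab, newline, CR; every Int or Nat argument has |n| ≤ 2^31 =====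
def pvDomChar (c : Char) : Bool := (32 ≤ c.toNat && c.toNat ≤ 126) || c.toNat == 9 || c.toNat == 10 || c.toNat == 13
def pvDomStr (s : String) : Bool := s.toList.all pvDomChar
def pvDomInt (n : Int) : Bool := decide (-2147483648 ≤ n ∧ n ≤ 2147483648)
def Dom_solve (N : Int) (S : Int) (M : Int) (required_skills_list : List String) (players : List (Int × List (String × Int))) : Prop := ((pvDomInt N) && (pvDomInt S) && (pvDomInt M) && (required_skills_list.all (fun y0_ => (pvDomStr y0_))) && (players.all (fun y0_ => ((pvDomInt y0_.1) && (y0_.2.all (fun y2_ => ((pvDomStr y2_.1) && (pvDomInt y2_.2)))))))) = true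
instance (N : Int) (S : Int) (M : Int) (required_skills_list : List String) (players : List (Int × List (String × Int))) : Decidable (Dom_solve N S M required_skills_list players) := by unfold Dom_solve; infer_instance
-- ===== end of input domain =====

-- B replaces A's incremental per-skill top-k maintenance (append / re-sort / linear insertion scan per player)
-- by grouping all values per required skill and summing the top `quantity` of one descending sort per skill.

-- ===== PORT A =====
-- first loop of A: build skills[req_skill] = {skills: [], quantity: count, filled: False}
def solveInit (skills : PySem.Dict String (List Int × Int × Bool)) (req_skill : String) : PySem.Dict String (List Int × Int × Bool) :=
  if skills.contains req_skill then
    skills.modify req_skill ([], 0, false) (fun st => (st.1, st.2.1 + 1, st.2.2))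
  else
    skills.insert req_skill ([], 1, false)

-- body of A's player loop acting on the entry skills[skill] = (skills list, quantity, filled)
def solveUpd (st : List Int × Int × Bool) (v : Int) : List Int × Int × Bool :=
  if st.2.2 = false then
    let lst := st.1 ++ [v]
    if (lst.length : Int) > st.2.1 then
      -- .sort(reverse=True); .pop(-1) of this nonempty list is dropLast; filled := True
      ((PySem.List.sorted lst (fun x => x) true).dropLast, st.2.1, true)
    else (lst, st.2.1, false)
  else
    -- for i, selected in enumerate(lst): if selected < v: lst.insert(i, v); lst.pop(-1); break
    match st.1.findIdx? (fun x => decide (x < v)) with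
    | some i => ((PySem.List.insert st.1 (i : Int) v).dropLast, st.2.1, st.2.2)
    | none => st

def solveStep (skills : PySem.Dict String (List Int × Int × Bool)) (p : Int × List (String × Int)) : PySem.Dict String (List Int × Int × Bool) :=
  match PySem.List.pyGet? (p.2.map Prod.fst) 0 with  -- skill = list(player.keys())[0]; none = IndexError (outside Pre_)
  | none => skills
  | some skill =>
    match skills.get? skill with
    | none => skills  -- skill not required: both branches of A's if/elif are skipped
    | some st =>
      -- player[skill]: skill is the first key of the player dict, so this lookup always succeeds
      skills.insert skill (solveUpd st ((PySem.Dict.mk p.2).getD skill 0))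

def solve (N : Int) (S : Int) (M : Int) (required_skills_list : List String) (players : List (Int × List (String × Int))) : Int :=
  let skills := required_skills_list.foldl solveInit PySem.Dict.empty
  let skills := players.foldl solveStep skills
  (skills.values.map (fun st => st.1.sum)).sum

-- ===== PORT B =====
-- B's player loop: values.setdefault(skill, []).append(value) for required skills (in-place append = insert of the appended list)
def solveAltCollect (quantity : PySem.Dict String Int) (d : PySem.Dict String (List Int)) (p : Int × List (String × Int)) : PySem.Dict String (List Int) :=
  match p.2.head? with  -- skill, value = next(iter(player.items())); none = StopIteration (outside Pre_)
  | none => d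
  | some kv => if quantity.contains kv.1 then d.insert kv.1 (d.getD kv.1 [] ++ [kv.2]) else d

def solve_alt (N : Int) (S : Int) (M : Int) (required_skills_list : List String) (players : List (Int × List (String × Int))) : Int :=
  let quantity := required_skills_list.foldl (fun d s => d.insert s (d.getD s 0 + 1)) PySem.Dict.empty
  let values := players.foldl (solveAltCollect quantity) PySem.Dict.empty
  quantity.items.foldl
    (fun total sq =>
      total + (PySem.List.slice (PySem.List.sorted (values.getD sq.1 []) (fun x => x) true) none (some sq.2)).sum)
    0

-- ===== PRECONDITION & SPEC =====
-- Pre_ excludes exactly the players with an empty skill dict: there Python A raises IndexError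
-- (list(player.keys())[0]) and Python B raises StopIteration; neither returns a value.
def Pre_solve (N : Int) (S : Int) (M : Int) (required_skills_list : List String) (players : List (Int × List (String × Int))) : Prop :=
  ∀ p ∈ players, p.2 ≠ []
instance (N : Int) (S : Int) (M : Int) (required_skills_list : List String) (players : List (Int × List (String × Int))) : Decidable (Pre_solve N S M required_skills_list players) := by unfold Pre_solve; infer_instance

def pvWitness_solve : Int × Int × Int × List String × (List (Int × List (String × Int))) :=
  (0, 0, 0, ["a", "a", "b"], [(1, [("a", 5)]), (2, [("a", 7)]), (3, [("c", 9)])])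

def Spec_solve (N : Int) (S : Int) (M : Int) (required_skills_list : List String) (players : List (Int × List (String × Int))) (out : Int) : Prop := out = solve_alt N S M required_skills_list players
instance (N : Int) (S : Int) (M : Int) (required_skills_list : List String) (players : List (Int × List (String × Int))) (out : Int) : Decidable (Spec_solve N S M required_skills_list players out) := by unfold Spec_solve; infer_instance

-- ===== CLAIM (what is proved, stated in full; the proofs are below) =====
def Claim_equal_solve : Prop := ∀ (N : Int) (S : Int) (M : Int) (required_skills_list : List String) (players : List (Int × List (String × Int))), Dom_solve N S M required_skills_list players → Pre_solve N S M required_skills_list players → Spec_solve N S M required_skills_list players (solve N S M required_skills_list players)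

-- ===== LEMMAS AND PROOFS =====

-- the stream of (first-key, first-value) events of skill s, in player order
def pvEvs (players : List (Int × List (String × Int))) (s : String) : List Int :=
  ((players.filterMap (fun p => p.2.head?)).filter (fun e => e.1 == s)).map (·.2)

def pvSortD (xs : List Int) : List Int := PySem.List.sorted xs (fun x => x) true

theorem pv_length_sortD (xs : List Int) : (pvSortD xs).length = xs.length :=
  PySem.List.length_sorted xs (fun x => x) true

theorem pv_sortD_eq {xs ys : List Int} (hperm : ys.Perm xs)
    (hsort : ys.Pairwise (fun a b => b ≤ a)) : pvSortD xs = ys := by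
  have h1 : (pvSortD xs).Pairwise (fun a b : Int => b ≤ a) :=
    PySem.List.sorted_pairwise_rev xs (fun x => x)
  have h2 : (pvSortD xs).Perm ys := (PySem.List.sorted_perm xs (fun x => x) true).trans hperm.symm
  exact List.Perm.eq_of_pairwise (fun a b _ _ hab hba => le_antisymm hba hab) h1 hsort h2

theorem pv_sortD_append (xs : List Int) (v : Int) :
    pvSortD (xs ++ [v]) =
      (pvSortD xs).take ((pvSortD xs).findIdx (fun x => decide (x < v))) ++
        v :: (pvSortD xs).drop ((pvSortD xs).findIdx (fun x => decide (x < v))) := by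
  set S := pvSortD xs with hS
  set p : Int → Bool := fun x => decide (x < v) with hp
  set j := S.findIdx p with hj
  have hjle : j ≤ S.length := List.findIdx_le_length
  have hsorted : S.Pairwise (fun a b : Int => b ≤ a) := PySem.List.sorted_pairwise_rev xs (fun x => x)
  have hget : ∀ (p' q' : Nat) (hpq : p' ≤ q') (h : q' < S.length),
      S[q'] ≤ S[p']'(Nat.lt_of_le_of_lt hpq h) := by
    intro p' q' hpq h
    rcases Nat.eq_or_lt_of_le hpq with rfl | hlt
    · exact le_refl _
    · exact (List.pairwise_iff_getElem.mp hsorted) p' q' (Nat.lt_of_le_of_lt hpq h) h hlt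
  -- elements of take j are ≥ v; elements of drop j are < v
  have htake : ∀ x ∈ S.take j, v ≤ x := by
    intro x hx
    obtain ⟨m, hm, rfl⟩ := List.mem_take_iff_getElem.mp hx
    have hmj : m < j := (lt_min_iff.mp hm).1
    have := List.not_of_lt_findIdx (p := p) (xs := S) hmj
    simp only [hp, decide_eq_false_iff_not, not_lt] at this
    exact this
  have hdrop : ∀ x ∈ S.drop j, x < v := by
    intro x hx
    obtain ⟨m, hm, rfl⟩ := List.mem_drop_iff_getElem.mp hx
    have hjlt : j < S.length := by omega
    have hpj : p S[j] = true := List.findIdx_getElem (w := hjlt)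
    have hle : S[j + m]'(by omega) ≤ S[j] := hget j (j+m) (Nat.le_add_right _ _) (by omega)
    simp only [hp, decide_eq_true_eq] at hpj
    omega
  have hperm : (S.take j ++ v :: S.drop j).Perm (xs ++ [v]) := by
    refine List.perm_middle.trans ?_
    rw [List.take_append_drop]
    exact ((PySem.List.sorted_perm xs (fun x => x) true).cons v).trans (List.perm_append_singleton v xs).symm
  have hpw : (S.take j ++ v :: S.drop j).Pairwise (fun a b : Int => b ≤ a) := by
    rw [List.pairwise_append]
    refine ⟨hsorted.sublist (List.take_sublist _ _), ?_, ?_⟩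
    · rw [List.pairwise_cons]
      exact ⟨fun y hy => le_of_lt (hdrop y hy), hsorted.sublist (List.drop_sublist _ _)⟩
    · intro a ha b hb
      rcases List.mem_cons.mp hb with rfl | hb
      · exact htake a ha
      · exact le_of_lt (lt_of_lt_of_le (hdrop b hb) (htake a ha))
  exact pv_sortD_eq hperm hpw

theorem solveUpd_unfilled (l : List Int) (q : Int) (v : Int) :
    solveUpd (l, q, false) v =
      if ((l ++ [v]).length : Int) > q then
        ((PySem.List.sorted (l ++ [v]) (fun x => x) true).dropLast, q, true)
      else (l ++ [v], q, false) := by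
  simp [solveUpd]

theorem solveUpd_filled (l : List Int) (q : Int) (v : Int) :
    solveUpd (l, q, true) v =
      match l.findIdx? (fun x => decide (x < v)) with
      | some i => ((PySem.List.insert l (i : Int) v).dropLast, q, true)
      | none => (l, q, true) := by
  simp [solveUpd]

theorem pv_loop_inv (qn : Nat) (vs : List Int) :
    vs.foldl solveUpd ([], (qn : Int), false) =
      if vs.length ≤ qn then (vs, (qn : Int), false)
      else ((pvSortD vs).take qn, (qn : Int), true) := by
  induction vs using List.reverseRecOn with
  | nil => simp
  | append_singleton vs v ih =>
    rw [List.foldl_concat, ih]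
    by_cases hle : vs.length ≤ qn
    · rw [if_pos hle]
      by_cases heq : vs.length = qn
      · -- overflow: list reaches qn+1 elements, sort desc, pop last, filled := True
        have hgt : ¬ ((vs ++ [v]).length ≤ qn) := by simp; omega
        rw [if_neg hgt]
        have hcond : (((vs ++ [v]).length : Nat) : Int) > (qn : Int) := by
          simp only [List.length_append, List.length_cons, List.length_nil]
          exact_mod_cast by omega
        rw [solveUpd_unfilled, if_pos hcond]
        have hlen : (PySem.List.sorted (vs ++ [v]) (fun x => x) true).length = qn + 1 := by
          rw [PySem.List.length_sorted]
          simp only [List.length_append, List.length_cons, List.length_nil]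
          omega
        rw [List.dropLast_eq_take, hlen]
        simp [pvSortD]
      · have hle2 : (vs ++ [v]).length ≤ qn := by simp; omega
        rw [if_pos hle2]
        have hcond : ¬ ((((vs ++ [v]).length : Nat) : Int) > (qn : Int)) := by
          simp only [List.length_append, List.length_cons, List.length_nil]
          exact_mod_cast by omega
        rw [solveUpd_unfilled, if_neg hcond]
    · rw [if_neg hle]
      have hq : qn < vs.length := by omega
      have hnle : ¬ ((vs ++ [v]).length ≤ qn) := by simp; omega
      rw [if_neg hnle]
      set S := pvSortD vs with hS
      set p : Int → Bool := fun x => decide (x < v) with hp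
      have hSlen : S.length = vs.length := pv_length_sortD vs
      have hLlen : (S.take qn).length = qn := by simp [hSlen]; omega
      rw [solveUpd_filled]
      rw [pv_sortD_append]
      rw [← hS, ← hp]
      set j := S.findIdx p with hj
      have hjle : j ≤ S.length := List.findIdx_le_length
      cases hfi : (S.take qn).findIdx? p with
      | none =>
        simp only [hfi]
        -- no kept value is < v: v is not among the top qn, list unchanged
        have hnone := List.findIdx?_eq_none_iff.mp hfi
        have hqj : qn ≤ j := by
          by_contra hcon
          push_neg at hcon
          have hjlen : j < S.length := by omega
          have hpj : p S[j] = true := List.findIdx_getElem (w := hjlen)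
          have : S[j] ∈ S.take qn := by
            rw [List.mem_take_iff_getElem]
            exact ⟨j, by omega, by simp⟩
          have := hnone _ this
          simp_all
        rw [List.take_append]
        have h1 : (S.take j).length = j := by simp; omega
        rw [h1]
        have h0 : qn - j = 0 := by omega
        rw [h0]
        simp [List.take_take, Nat.min_eq_left (le_of_lt (lt_of_lt_of_le hq (le_of_eq hSlen.symm)))]
        omega
      | some i =>
        simp only [hfi]
        obtain ⟨hiL, hpi, hprev⟩ := List.findIdx?_eq_some_iff_getElem.mp hfi
        have hiqn : i < qn := by omega
        have hji : j = i := by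
          rcases lt_trichotomy j i with h | h | h
          · have hjlen : j < S.length := by omega
            have hpj : p S[j] = true := List.findIdx_getElem (w := hjlen)
            have hfalse : ¬ p ((S.take qn)[j]'(by omega)) = true := hprev j h
            rw [List.getElem_take] at hfalse
            simp_all
          · exact h
          · have hfalse := List.not_of_lt_findIdx (p := p) (xs := S) (i := i) (by omega)
            rw [List.getElem_take] at hpi
            simp_all
        rw [hji]
        rw [PySem.List.insert_natCast _ _ _ (by omega)]
        have hlen2 : ((S.take qn).take i ++ v :: (S.take qn).drop i).length = qn + 1 := by
          simp; omega
        rw [List.dropLast_eq_take, hlen2]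
        simp only [Nat.add_sub_cancel]
        -- both sides: take i S ++ v :: take (qn-1-i) (drop i S)
        have e1 : (S.take qn).take i = S.take i := by rw [List.take_take]; congr 1; omega
        have e2 : (S.take qn).drop i = (S.drop i).take (qn - i) := List.drop_take
        rw [e1, e2, List.take_append, List.take_append]
        have h1 : (S.take i).length = i := by simp; omega
        rw [h1, List.take_take]
        congr 1
        have h4 : qn - i = (qn - i - 1) + 1 := by omega
        rw [h4, List.take_succ_cons, List.take_succ_cons, List.take_take,
          Nat.min_eq_left (Nat.le_succ _)]

theorem pv_sum_perskill (qn : Nat) (vs : List Int) :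
    (vs.foldl solveUpd ([], (qn : Int), false)).1.sum = ((pvSortD vs).take qn).sum := by
  rw [pv_loop_inv]
  by_cases h : vs.length ≤ qn
  · rw [if_pos h]
    have h1 : (pvSortD vs).take qn = pvSortD vs :=
      List.take_of_length_le (by rw [pvSortD, PySem.List.length_sorted]; exact h)
    rw [h1]
    exact ((PySem.List.sorted_perm vs (fun x => x) true).sum_eq).symm
  · rw [if_neg h]

theorem pv_first_key (l : List (String × Int)) :
    PySem.List.pyGet? (l.map Prod.fst) 0 = l.head?.map Prod.fst := by
  have h := PySem.List.pyGet?_natCast (l.map Prod.fst) 0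
  simp only [Nat.cast_zero] at h
  rw [h]
  cases l <;> simp

theorem solveInit_eq (d : PySem.Dict String (List Int × Int × Bool)) (r : String) :
    solveInit d r =
      if d.contains r = true then d.modify r ([], 0, false) (fun st => (st.1, st.2.1 + 1, st.2.2))
      else d.insert r ([], 1, false) := rfl

theorem pv_init (req : List String) :
    (req.foldl solveInit PySem.Dict.empty).keys = PySem.Set.ofList req ∧
      ∀ s, (req.foldl solveInit PySem.Dict.empty).getD s ([], 0, false)
        = ([], (req.count s : Int), false) := by
  induction req using List.reverseRecOn with
  | nil =>
    refine ⟨by simp [PySem.Dict.keys_empty, PySem.Set.ofList_nil], ?_⟩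
    intro s
    simp [PySem.Dict.getD_empty]
  | append_singleton req r ih =>
    obtain ⟨ihk, ihg⟩ := ih
    rw [List.foldl_concat, solveInit_eq]
    by_cases hc : (req.foldl solveInit PySem.Dict.empty).contains r = true
    · rw [if_pos hc]
      have hmem : r ∈ PySem.Set.ofList req := by
        rw [← ihk]
        exact (PySem.Dict.contains_iff_mem_keys _ r).mp hc
      constructor
      · rw [PySem.Dict.keys_modify, PySem.Dict.keys_insert_of_contains _ _ hc, ihk,
          PySem.Set.ofList_append_singleton, PySem.Set.add_of_mem hmem]
      · intro s
        by_cases hsr : s = r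
        · subst hsr
          rw [PySem.Dict.getD_modify_self, ihg s]
          simp only [List.count_append, List.count_cons_self, List.count_nil]
          norm_num
        · rw [PySem.Dict.getD_modify_of_ne _ _ _ hsr, ihg s]
          have : List.count s [r] = 0 := by
            simp [List.count_singleton]
            exact fun h => absurd h.symm hsr
          rw [List.count_append, this]
          simp
    · rw [if_neg hc]
      have hcf : (req.foldl solveInit PySem.Dict.empty).contains r = false := by
        simpa using hc
      have hnm : r ∉ PySem.Set.ofList req := by
        rw [← ihk]
        intro hmem
        exact hc ((PySem.Dict.contains_iff_mem_keys _ r).mpr hmem)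
      constructor
      · rw [PySem.Dict.keys_insert_of_not_contains _ _ hcf, ihk,
          PySem.Set.ofList_append_singleton, PySem.Set.add_of_not_mem hnm]
      · intro s
        by_cases hsr : s = r
        · subst hsr
          rw [PySem.Dict.getD_insert_self]
          have h0 : List.count s req = 0 := by
            rw [List.count_eq_zero]
            intro hmem
            exact hnm ((PySem.Set.mem_ofList req s).mpr hmem)
          simp [List.count_append, h0]
        · rw [PySem.Dict.getD_insert_of_ne _ _ _ hsr, ihg s]
          have : List.count s [r] = 0 := by
            simp [List.count_singleton]
            exact fun h => absurd h.symm hsr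
          rw [List.count_append, this]
          simp

theorem pv_step_keys (ps : List (Int × List (String × Int)))
    (d : PySem.Dict String (List Int × Int × Bool)) :
    (ps.foldl solveStep d).keys = d.keys := by
  induction ps generalizing d with
  | nil => rfl
  | cons p ps ih =>
    rw [List.foldl_cons, ih]
    show (solveStep d p).keys = d.keys
    cases hp2 : p.2 with
    | nil =>
      simp only [solveStep, pv_first_key, hp2, List.head?_nil, Option.map_none]
    | cons kv t =>
      cases hg : d.get? kv.1 with
      | none => simp only [solveStep, pv_first_key, hp2, List.head?_cons, Option.map_some, hg]
      | some st =>
        have hc : d.contains kv.1 = true := by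
          rw [PySem.Dict.contains_eq_isSome_get?, hg]; rfl
        simp only [solveStep, pv_first_key, hp2, List.head?_cons, Option.map_some, hg]
        exact PySem.Dict.keys_insert_of_contains _ _ hc

theorem pv_step_getD (ps : List (Int × List (String × Int)))
    (d : PySem.Dict String (List Int × Int × Bool)) (s : String)
    (hs : d.contains s = true) :
    (ps.foldl solveStep d).getD s ([], 0, false)
      = (pvEvs ps s).foldl solveUpd (d.getD s ([], 0, false)) := by
  induction ps generalizing d with
  | nil => rfl
  | cons p ps ih =>
    rw [List.foldl_cons]
    cases hp2 : p.2 with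
    | nil =>
      have hstep : solveStep d p = d := by
        simp only [solveStep, pv_first_key, hp2, List.head?_nil, Option.map_none]
      have hevs : pvEvs (p :: ps) s = pvEvs ps s := by
        simp [pvEvs, hp2]
      rw [hstep, hevs, ih d hs]
    | cons kv t =>
      have hkey : PySem.List.pyGet? (p.2.map Prod.fst) 0 = some kv.1 := by
        rw [pv_first_key, hp2]; rfl
      cases hg : d.get? kv.1 with
      | none =>
        have hstep : solveStep d p = d := by
          simp only [solveStep, hkey, hg]
        have hne : kv.1 ≠ s := by
          intro he
          rw [he] at hg
          rw [PySem.Dict.contains_eq_isSome_get?, hg] at hs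
          cases hs
        have hevs : pvEvs (p :: ps) s = pvEvs ps s := by
          simp [pvEvs, hp2, hne]
        rw [hstep, hevs, ih d hs]
      | some st =>
        have hval : (PySem.Dict.mk p.2).getD kv.1 0 = kv.2 := by
          rw [hp2, PySem.Dict.getD_eq_get?_getD]
          have hq : (PySem.Dict.mk (kv :: t)).get? kv.1 = some kv.2 := by
            rw [show (kv :: t) = ((kv.1, kv.2) :: t) from by rw [Prod.mk.eta],
              PySem.Dict.get?_mk_cons]
            simp
          rw [hq]
          rfl
        have hstep : solveStep d p = d.insert kv.1 (solveUpd st kv.2) := by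
          simp only [solveStep, hkey, hg, hval]
        rw [hstep]
        have hs' : (d.insert kv.1 (solveUpd st kv.2)).contains s = true := by
          rw [PySem.Dict.contains_insert]
          simp [hs]
        rw [ih _ hs']
        by_cases hks : kv.1 = s
        · have hevs : pvEvs (p :: ps) s = kv.2 :: pvEvs ps s := by
            simp [pvEvs, hp2, hks]
          rw [hevs, List.foldl_cons, hks, PySem.Dict.getD_insert_self]
          rw [← hks, PySem.Dict.getD_of_get?_eq_some _ _ hg]
        · have hevs : pvEvs (p :: ps) s = pvEvs ps s := by
            simp [pvEvs, hp2, hks]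
          rw [hevs, PySem.Dict.getD_insert_of_ne _ _ _ (fun h => hks h.symm)]

theorem pv_collect_getD (ps : List (Int × List (String × Int)))
    (q : PySem.Dict String Int) (d : PySem.Dict String (List Int)) (s : String)
    (hs : q.contains s = true) :
    (ps.foldl (solveAltCollect q) d).getD s [] = d.getD s [] ++ pvEvs ps s := by
  induction ps generalizing d with
  | nil => simp [pvEvs]
  | cons p ps ih =>
    rw [List.foldl_cons]
    cases hp2 : p.2 with
    | nil =>
      have hstep : solveAltCollect q d p = d := by
        simp only [solveAltCollect, hp2, List.head?_nil]
      have hevs : pvEvs (p :: ps) s = pvEvs ps s := by simp [pvEvs, hp2]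
      rw [hstep, hevs, ih d]
    | cons kv t =>
      by_cases hqc : q.contains kv.1 = true
      · have hstep : solveAltCollect q d p = d.insert kv.1 (d.getD kv.1 [] ++ [kv.2]) := by
          simp only [solveAltCollect, hp2, List.head?_cons, hqc, if_pos]
        rw [hstep, ih _]
        by_cases hks : kv.1 = s
        · have hevs : pvEvs (p :: ps) s = kv.2 :: pvEvs ps s := by simp [pvEvs, hp2, hks]
          rw [hevs, hks, PySem.Dict.getD_insert_self]
          simp
        · have hevs : pvEvs (p :: ps) s = pvEvs ps s := by simp [pvEvs, hp2, hks]
          rw [hevs, PySem.Dict.getD_insert_of_ne _ _ _ (fun h => hks h.symm)]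
      · have hstep : solveAltCollect q d p = d := by
          simp only [solveAltCollect, hp2, List.head?_cons, hqc]
          simp
        have hne : kv.1 ≠ s := fun he => hqc (he ▸ hs)
        have hevs : pvEvs (p :: ps) s = pvEvs ps s := by simp [pvEvs, hp2, hne]
        rw [hstep, hevs, ih d]

-- ===== VERDICT (by name: the statement is the Claim_ definition above) =====
theorem solve_spec : Claim_equal_solve := by
  unfold Claim_equal_solve
  intro N S M req players _hdom _hpre
  unfold Spec_solve solve solve_alt
  obtain ⟨hk0, hg0⟩ := pv_init req
  simp only
  have hkeys : (players.foldl solveStep (req.foldl solveInit PySem.Dict.empty)).keys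
      = PySem.Set.ofList req := by
    rw [pv_step_keys, hk0]
  have hnd : (players.foldl solveStep (req.foldl solveInit PySem.Dict.empty)).keys.Nodup := by
    rw [hkeys]; exact PySem.Set.nodup_ofList req
  rw [PySem.Dict.values_eq_map_keys _ hnd ([], 0, false), hkeys]
  rw [PySem.Dict.foldl_insert_getD_add_one_eq_counter, PySem.List.foldl_add,
    PySem.Dict.items_counter, zero_add, List.map_map, List.map_map]
  refine congrArg List.sum (List.map_congr_left ?_)
  intro k hk
  have hkreq : k ∈ req := (PySem.Set.mem_ofList req k).mp hk
  simp only [Function.comp]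
  have hcont : (req.foldl solveInit PySem.Dict.empty).contains k = true :=
    (PySem.Dict.contains_iff_mem_keys _ k).mpr (by rw [hk0]; exact hk)
  rw [pv_step_getD players _ k hcont, hg0 k, pv_sum_perskill]
  have hqc : (PySem.Dict.counter req).contains k = true := by
    rw [PySem.Dict.contains_counter]; simpa using hkreq
  rw [pv_collect_getD players _ _ k hqc, PySem.Dict.getD_empty, List.nil_append,
    PySem.List.slice_to_natCast]
  rfl
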